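-- pv_equiv track=rewrite | github.com/uustortoise/Beta_6 | backend/processors/profile_processor.py | _normalize_layout_adjacency
-- ===== SOURCE A (Python) =====
-- from typing import Dict, Any, List, Mapping, Optional
--
-- def _token(value: Any) -> str:
--     return str(value or "").strip().lower()
--
-- def _normalize_room_key(value: Any) -> str:
--     room = _token(value)
--     return room.replace(" ", "_")
--
-- def _normalize_layout_adjacency(raw_adjacency: Any) -> Dict[str, List[str]]:
--     if not isinstance(raw_adjacency, Mapping):
--         return {}
--
--     normalized: Dict[str, List[str]] = {}
--     for raw_room, raw_neighbors in raw_adjacency.items():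
--         room = _normalize_room_key(raw_room)
--         if not room:
--             continue
--         if isinstance(raw_neighbors, str):
--             candidates = [raw_neighbors]
--         elif isinstance(raw_neighbors, list):
--             candidates = raw_neighbors
--         else:
--             continue
--         seen: set[str] = set()
--         neighbors: List[str] = []
--         for candidate in candidates:
--             neighbor = _normalize_room_key(candidate)
--             if not neighbor or neighbor == room or neighbor in seen:
--                 continue
--             seen.add(neighbor)
--             neighbors.append(neighbor)
--         normalized[room] = sorted(neighbors)
--
--     # Make the graph symmetric so transition/arbitration code gets a stable contract.
--     for room, neighbors in list(normalized.items()):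
--         for neighbor in neighbors:
--             normalized.setdefault(neighbor, [])
--             if room not in normalized[neighbor]:
--                 normalized[neighbor].append(room)
--                 normalized[neighbor] = sorted(set(normalized[neighbor]))
--     return normalized
-- ===== SOURCE B (Python) =====
-- from typing import Any, Dict, List, Mapping
--
-- def _token(value: Any) -> str:
--     return str(value or "").strip().lower()
--
-- def _normalize_room_key(value: Any) -> str:
--     room = _token(value)
--     return room.replace(" ", "_")
--
-- def _normalize_layout_adjacency(raw_adjacency: Any) -> Dict[str, List[str]]:
--     if not isinstance(raw_adjacency, Mapping):
--         return {}
--     # base adjacency: normalized key -> set of normalized neighbours (last value wins)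
--     base: Dict[str, set] = {}
--     for raw_room, raw_neighbors in raw_adjacency.items():
--         room = _normalize_room_key(raw_room)
--         if not room:
--             continue
--         if isinstance(raw_neighbors, str):
--             raw_neighbors = [raw_neighbors]
--         elif not isinstance(raw_neighbors, list):
--             continue
--         base[room] = {n for n in map(_normalize_room_key, raw_neighbors)
--                       if n and n != room}
--     # key order: base keys first, then neighbours that are not keys, in the
--     # order they are first reached (rooms in insertion order, neighbours sorted)
--     extra: List[str] = []
--     for room, ns in base.items():
--         for n in sorted(ns):
--             if n not in base and n not in extra:
--                 extra.append(n)
--     # gather: each room's symmetric neighbourhood is read off directly as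
--     # "its own neighbours, plus every room that points at it" — no mutation pass
--     return {k: sorted(base.get(k, set()) | {r for r, ns in base.items() if k in ns})
--             for k in list(base) + extra}
-- ===== Notes on version B (the rewrite author's own statement) =====
-- stated objective: alternative
-- what changed: A symmetrizes by a second mutation pass over a snapshot of the normalized dict (setdefault, membership test, conditional append, re-sort per edge); B never mutates a result dict at all: it fixes the key order up front and computes each room's row in closed form as its own neighbours unioned with the set of rooms that point at it (a read-only reverse-scan gather instead of a scatter of edge insertions), trading speed on large inputs for the mutation-free formulation.
import Mathlib
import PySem

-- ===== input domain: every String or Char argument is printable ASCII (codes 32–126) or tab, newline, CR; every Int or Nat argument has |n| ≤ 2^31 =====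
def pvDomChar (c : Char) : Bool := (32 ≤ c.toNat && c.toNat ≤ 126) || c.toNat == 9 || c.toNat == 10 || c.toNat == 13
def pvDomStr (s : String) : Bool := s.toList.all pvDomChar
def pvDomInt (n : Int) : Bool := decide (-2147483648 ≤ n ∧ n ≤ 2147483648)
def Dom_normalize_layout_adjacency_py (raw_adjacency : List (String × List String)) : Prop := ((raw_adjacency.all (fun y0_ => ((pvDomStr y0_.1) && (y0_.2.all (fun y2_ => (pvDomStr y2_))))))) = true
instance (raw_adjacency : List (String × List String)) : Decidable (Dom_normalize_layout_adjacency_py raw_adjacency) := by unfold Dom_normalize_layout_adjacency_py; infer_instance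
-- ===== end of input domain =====

-- B replaces A's mutation-based symmetrization pass (setdefault, membership test, conditional
-- append, re-sort per edge) by a read-only gather: it fixes the key order up front and computes
-- each room's row in closed form as its own neighbours unioned with the rooms pointing at it;
-- objective: alternative (a genuinely different, mutation-free formulation; it is not faster,
-- and on large inputs the per-key reverse scan is slower than A).

-- ===== PORT A =====
-- shared helpers (the same module-level helpers both Pythons use)
def pvToken (s : String) : String :=
  -- str(value or "").strip().lower(): on a str argument 'value or ""' is the string itself ("" stays "")
  PySem.Str.lower (PySem.Str.strip s)

def pvNormKey (s : String) : String :=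
  PySem.Str.replace (pvToken s) " " "_"

-- sorted(xs) on strings: Python's str order is the code-point order of the character list
-- (PYSEM.md 'str COMPARISON'), so sorted is keyed by .toList.
def pvF (v : List String) : List String := PySem.List.sorted v (fun x => x.toList)

-- the seen/neighbors loop over candidates
def pvInnerA (room : String) (candidates : List String) : PySem.Set String × List String :=
  candidates.foldl (fun st c =>
      let n := pvNormKey c
      if n = "" ∨ n = room ∨ n ∈ st.1 then st
      else (PySem.Set.add st.1 n, st.2 ++ [n]))
    (PySem.Set.empty, [])

-- the first loop: normalized[room] = sorted(neighbors)
def pvPhase1A (raw_adjacency : List (String × List String)) : PySem.Dict String (List String) :=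
  raw_adjacency.foldl (fun d p =>
      let room := pvNormKey p.1
      if room = "" then d
      else d.insert room (pvF (pvInnerA room p.2).2))
    PySem.Dict.empty

-- one step of the symmetrization inner loop: setdefault, then conditional append + sorted(set(...))
def pvSymStepA (room : String) (d : PySem.Dict String (List String)) (n : String) : PySem.Dict String (List String) :=
  let d := d.setdefault n []
  if room ∈ d.getD n [] then d
  else d.insert n (pvF (PySem.Set.ofList (d.getD n [] ++ [room])))

def normalize_layout_adjacency_py (raw_adjacency : List (String × List String)) : List (String × List String) :=
  -- the argument is typed Mapping str -> list[str] here, so the 'not a Mapping' early return and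
  -- the isinstance(…, str) / 'not a list' branches never fire.
  -- Symmetrization runs over a snapshot of items.  (In Python the snapshot lists can gain
  -- appended elements through aliasing before being rebound; each such extra inner iteration is
  -- a no-op — the symmetric edge is already present — so the immutable snapshot is result-exact.)
  ((pvPhase1A raw_adjacency).items.foldl (fun d p => p.2.foldl (pvSymStepA p.1) d)
    (pvPhase1A raw_adjacency)).items

-- ===== PORT B =====
-- base adjacency: normalized key -> set of normalized neighbours (last value wins)
def pvPhase1B (raw_adjacency : List (String × List String)) : PySem.Dict String (PySem.Set String) :=
  raw_adjacency.foldl (fun d p =>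
      let room := pvNormKey p.1
      if room = "" then d
      else d.insert room
        (PySem.Set.ofList ((p.2.map pvNormKey).filter (fun n => !(n == "") && !(n == room)))))
    PySem.Dict.empty

-- one step of the extra-key scan: if n not in base and n not in extra: extra.append(n)
def pvExtraStep (base : PySem.Dict String (PySem.Set String)) (acc : List String) (n : String) : List String :=
  if base.contains n = true ∨ n ∈ acc then acc else acc ++ [n]

-- extra: neighbours that are not keys, rooms in insertion order, neighbours sorted
def pvExtra (base : PySem.Dict String (PySem.Set String)) : List String :=
  base.items.foldl (fun acc p => (pvF p.2).foldl (pvExtraStep base) acc) []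

-- {r for r, ns in base.items() if k in ns} (the set comprehension: rooms are distinct keys)
def pvRev (base : PySem.Dict String (PySem.Set String)) (k : String) : List String :=
  base.items.filterMap (fun p => if k ∈ (p.2 : List String) then some p.1 else none)

-- sorted(base.get(k, set()) | {r for r, ns in base.items() if k in ns})
def pvRow (base : PySem.Dict String (PySem.Set String)) (k : String) : List String :=
  pvF (PySem.Set.union (base.getD k PySem.Set.empty) (PySem.Set.ofList (pvRev base k)))

def normalize_layout_adjacency_py_alt (raw_adjacency : List (String × List String)) : List (String × List String) :=
  -- {k: sorted(...) for k in list(base) + extra}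
  ((pvPhase1B raw_adjacency).keys ++ pvExtra (pvPhase1B raw_adjacency)).map
    (fun k => (k, pvRow (pvPhase1B raw_adjacency) k))

-- ===== PRECONDITION & SPEC =====
def Spec_normalize_layout_adjacency_py (raw_adjacency : List (String × List String)) (out : List (String × List String)) : Prop := out = normalize_layout_adjacency_py_alt raw_adjacency
instance (raw_adjacency : List (String × List String)) (out : List (String × List String)) : Decidable (Spec_normalize_layout_adjacency_py raw_adjacency out) := by unfold Spec_normalize_layout_adjacency_py; infer_instance

-- ===== CLAIM (what is proved, stated in full; the proofs are below) =====
def Claim_equal_normalize_layout_adjacency_py : Prop := ∀ (raw_adjacency : List (String × List String)), Dom_normalize_layout_adjacency_py raw_adjacency → Spec_normalize_layout_adjacency_py raw_adjacency (normalize_layout_adjacency_py raw_adjacency)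

-- ===== LEMMAS AND PROOFS =====

-- sorted-by-toList under the LinearOrder decidability instance is the same function
theorem pv_sorted_inst (xs : List String) :
    pvF xs
      = @PySem.List.sorted String (List Char) _ LinearOrder.toDecidableLT xs (fun x => x.toList) false := by
  unfold pvF
  have h : (fun (a b : List Char) => a.decidableLT b) = (LinearOrder.toDecidableLT : DecidableLT (List Char)) := by
    funext a b; exact Subsingleton.elim _ _
  rw [h]

theorem pvF_perm (v : List String) : (pvF v).Perm v := PySem.List.sorted_perm v _ _

theorem pvF_nodup {v : List String} (h : v.Nodup) : (pvF v).Nodup :=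
  ((pvF_perm v).nodup_iff).mpr h

theorem pvF_eq_of_perm {u v : List String} (h : u.Perm v) : pvF u = pvF v := by
  rw [pv_sorted_inst u, pv_sorted_inst v]
  have pu := @PySem.List.sorted_perm String (List Char) _ LinearOrder.toDecidableLT u (fun x => x.toList) false
  have pv' := @PySem.List.sorted_perm String (List Char) _ LinearOrder.toDecidableLT v (fun x => x.toList) false
  exact PySem.List.eq_of_perm_of_pairwise_le_of_injective (fun x => x.toList)
    (fun a b hh => String.toList_inj.mp hh)
    (pu.trans (h.trans pv'.symm))
    (PySem.List.sorted_pairwise u _) (PySem.List.sorted_pairwise v _)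

-- value-map carrying a set-valued dict to A's list-valued dict
def pvG : String × PySem.Set String → String × List String := fun p => (p.1, pvF p.2)

def pvSMap (d : PySem.Dict String (PySem.Set String)) : PySem.Dict String (List String) :=
  PySem.Dict.mk (d.items.map pvG)

theorem pvSMap_keys (d : PySem.Dict String (PySem.Set String)) : (pvSMap d).keys = d.keys := by
  simp [pvSMap, PySem.Dict.keys, pvG, Function.comp]

theorem pvSMap_contains (d : PySem.Dict String (PySem.Set String)) (k : String) :
    (pvSMap d).contains k = d.contains k := by
  rw [PySem.Dict.contains_eq_decide_mem_keys, PySem.Dict.contains_eq_decide_mem_keys, pvSMap_keys]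

theorem pvSMap_insert (d : PySem.Dict String (PySem.Set String)) (k : String) (v : PySem.Set String) :
    pvSMap (d.insert k v) = (pvSMap d).insert k (pvF v) := by
  apply PySem.Dict.ext
  by_cases hc : d.contains k = true
  · rw [show (pvSMap (d.insert k v)).items = (d.insert k v).items.map pvG from rfl,
        PySem.Dict.items_insert_of_contains d v hc,
        PySem.Dict.items_insert_of_contains (pvSMap d) (pvF v) (by rw [pvSMap_contains]; exact hc)]
    show ((d.items.map _).map pvG) = (d.items.map pvG).map _
    rw [List.map_map, List.map_map]
    refine List.map_congr_left (fun p _ => ?_)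
    by_cases hk : p.1 = k <;> simp [pvG, hk, Function.comp]
  · have hc' : d.contains k = false := by simpa using hc
    rw [show (pvSMap (d.insert k v)).items = (d.insert k v).items.map pvG from rfl,
        PySem.Dict.items_insert_of_not_contains d v hc',
        PySem.Dict.items_insert_of_not_contains (pvSMap d) (pvF v) (by rw [pvSMap_contains]; exact hc')]
    simp [pvSMap, pvG]

-- invariant carried through both phases on the set-valued dict
def pvInv (d : PySem.Dict String (PySem.Set String)) : Prop :=
  d.keys.Nodup ∧ ∀ p ∈ d.items, (p.2 : List String).Nodup

theorem pvInv_insert {d : PySem.Dict String (PySem.Set String)} (hd : pvInv d)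
    {v : PySem.Set String} (hv : (v : List String).Nodup) (k : String) : pvInv (d.insert k v) := by
  refine ⟨PySem.Dict.nodup_keys_insert d k v hd.1, fun p hp => ?_⟩
  rcases (PySem.Dict.mem_items_insert d k v p).mp hp with h | h
  · subst h; exact hv
  · exact hd.2 p h.1

-- A's seen/neighbors loop computes the ordered dedup of the filtered, normalized candidates
theorem pvInnerA_go (room : String) (cs : List String) (l : List String) :
    cs.foldl (fun st c =>
        let n := pvNormKey c
        if n = "" ∨ n = room ∨ n ∈ st.1 then st
        else (PySem.Set.add st.1 n, st.2 ++ [n])) ((l, l) : PySem.Set String × List String)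
      = (PySem.Set.update l ((cs.map pvNormKey).filter (fun n => !(n == "") && !(n == room))),
         PySem.Set.update l ((cs.map pvNormKey).filter (fun n => !(n == "") && !(n == room)))) := by
  induction cs generalizing l with
  | nil => rfl
  | cons c cs ih =>
    simp only [List.foldl_cons, List.map_cons]
    by_cases h1 : pvNormKey c = ""
    · simp only [h1, List.filter_cons]; simp [ih l]
    · by_cases h2 : pvNormKey c = room
      · simp only [List.filter_cons]; simp [h2, ih l]
      · by_cases h3 : pvNormKey c ∈ l
        · simp only [List.filter_cons]
          have hupd : PySem.Set.update l (pvNormKey c :: (cs.map pvNormKey).filter (fun n => !(n == "") && !(n == room)))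
              = PySem.Set.update l ((cs.map pvNormKey).filter (fun n => !(n == "") && !(n == room))) := by
            rw [PySem.Set.update_cons, PySem.Set.add_of_mem h3]
          simp [h1, h2, h3, ih l, hupd]
        · simp only [List.filter_cons]
          have hstep : PySem.Set.add l (pvNormKey c) = l ++ [pvNormKey c] := PySem.Set.add_of_not_mem h3
          have hupd : PySem.Set.update l (pvNormKey c :: (cs.map pvNormKey).filter (fun n => !(n == "") && !(n == room)))
              = PySem.Set.update (l ++ [pvNormKey c]) ((cs.map pvNormKey).filter (fun n => !(n == "") && !(n == room))) := by
            rw [PySem.Set.update_cons, hstep]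
          simp [h1, h2, h3, ih (l ++ [pvNormKey c]), hupd]

theorem pvInnerA_eq (room : String) (cs : List String) :
    (pvInnerA room cs).2 = PySem.Set.ofList ((cs.map pvNormKey).filter (fun n => !(n == "") && !(n == room))) := by
  unfold pvInnerA
  rw [show (PySem.Set.empty, ([] : List String)) = (([] : List String), ([] : List String)) from rfl,
      pvInnerA_go room cs []]
  rw [PySem.Set.update_nil_left]

-- phase 1: A's dict is B's dict with sorted values, and B's dict satisfies the invariant
theorem pvPhase1_go (raw : List (String × List String)) (dB : PySem.Dict String (PySem.Set String)) (h : pvInv dB) :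
    raw.foldl (fun d p =>
        let room := pvNormKey p.1
        if room = "" then d
        else d.insert room (pvF (pvInnerA room p.2).2)) (pvSMap dB)
      = pvSMap (raw.foldl (fun d p =>
          let room := pvNormKey p.1
          if room = "" then d
          else d.insert room
            (PySem.Set.ofList ((p.2.map pvNormKey).filter (fun n => !(n == "") && !(n == room))))) dB)
    ∧ pvInv (raw.foldl (fun d p =>
          let room := pvNormKey p.1
          if room = "" then d
          else d.insert room
            (PySem.Set.ofList ((p.2.map pvNormKey).filter (fun n => !(n == "") && !(n == room))))) dB) := by
  induction raw generalizing dB with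
  | nil => exact ⟨rfl, h⟩
  | cons p raw ih =>
    simp only [List.foldl_cons]
    by_cases hr : pvNormKey p.1 = ""
    · simpa [hr] using ih dB h
    · have hins : pvInv (dB.insert (pvNormKey p.1)
          (PySem.Set.ofList ((p.2.map pvNormKey).filter (fun n => !(n == "") && !(n == pvNormKey p.1))))) :=
        pvInv_insert h (PySem.Set.nodup_ofList _) _
      have hih := ih _ hins
      simp only [hr, if_false]
      refine ⟨?_, hih.2⟩
      rw [← hih.1]
      congr 1
      rw [pvInnerA_eq, pvSMap_insert]

theorem pvPhase1_rel (raw : List (String × List String)) :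
    pvPhase1A raw = pvSMap (pvPhase1B raw) ∧ pvInv (pvPhase1B raw) := by
  have hemp : pvInv PySem.Dict.empty := ⟨List.nodup_nil, fun p hp => absurd hp (List.not_mem_nil)⟩
  have h := pvPhase1_go raw PySem.Dict.empty hemp
  rw [show pvSMap PySem.Dict.empty = PySem.Dict.empty from rfl] at h
  exact h

-- small dict facts used by the symmetrization step
theorem pv_setdefault_of_contains {d : PySem.Dict String (List String)} {k : String}
    (h : d.contains k = true) (v : List String) : d.setdefault k v = d := by
  simp [PySem.Dict.setdefault, h]

theorem pv_setdefault_of_not_contains {d : PySem.Dict String (List String)} {k : String}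
    (h : d.contains k = false) (v : List String) : d.setdefault k v = d.insert k v := by
  simp only [PySem.Dict.setdefault, h]
  apply PySem.Dict.ext
  rw [PySem.Dict.items_insert_of_not_contains d v h]
  rfl

theorem pv_insert_insert_same (d : PySem.Dict String (List String)) (k : String) (v w : List String) :
    (d.insert k v).insert k w = d.insert k w := by
  apply PySem.Dict.ext
  by_cases hc : d.contains k = true
  · rw [PySem.Dict.items_insert_of_contains _ w (PySem.Dict.contains_insert_self d k v),
        PySem.Dict.items_insert_of_contains d v hc,
        PySem.Dict.items_insert_of_contains d w hc, List.map_map]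
    refine List.map_congr_left (fun p _ => ?_)
    by_cases hk : p.1 = k <;> simp [hk, Function.comp]
  · have hc' : d.contains k = false := by simpa using hc
    rw [PySem.Dict.items_insert_of_contains _ w (PySem.Dict.contains_insert_self d k v),
        PySem.Dict.items_insert_of_not_contains d v hc',
        PySem.Dict.items_insert_of_not_contains d w hc', List.map_append]
    have hmapid : d.items.map (fun p => if (p.1 == k) = true then (k, w) else p) = d.items := by
      conv_rhs => rw [← List.map_id d.items]
      refine List.map_congr_left (fun p hp => ?_)
      have hk : p.1 ≠ k := by
        intro hkk
        have hmemk : k ∈ d.keys := by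
          simp only [PySem.Dict.keys]; exact hkk ▸ List.mem_map_of_mem hp
        rw [PySem.Dict.contains_eq_decide_mem_keys] at hc'
        simp [hmemk] at hc'
      simp [hk]
    rw [hmapid]; simp

theorem pv_insert_self_value {d : PySem.Dict String (PySem.Set String)} {k : String} {v : PySem.Set String}
    (h : d.get? k = some v) (hnd : d.keys.Nodup) : d.insert k v = d := by
  apply PySem.Dict.ext
  have hc : d.contains k = true := by rw [PySem.Dict.contains_eq_isSome_get?, h]; rfl
  rw [PySem.Dict.items_insert_of_contains d v hc]
  conv_rhs => rw [← List.map_id d.items]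
  refine List.map_congr_left (fun p hp => ?_)
  by_cases hk : p.1 = k
  · have hpair : p = (k, p.2) := by rw [← hk]
    have hp' : (k, p.2) ∈ d.items := by rw [← hpair]; exact hp
    have hv : some p.2 = some v := by rw [← h, PySem.Dict.get?_of_mem_items d hp' hnd]
    have hv' : p.2 = v := by injection hv
    simp only [id_eq, hk, beq_self_eq_true, if_true, ← hv']
    exact hpair.symm
  · simp [hk]

-- the set-valued scatter step the proof relates both programs to:
-- sym.setdefault(n, set()).add(room)
def pvSymStepB (room : String) (s : PySem.Dict String (PySem.Set String)) (n : String) : PySem.Dict String (PySem.Set String) :=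
  s.insert n (PySem.Set.add (s.getD n PySem.Set.empty) room)

-- one A-symmetrization step is the scatter step through the value map
theorem pvSymStep_rel (room n : String) (dB : PySem.Dict String (PySem.Set String)) (h : pvInv dB) :
    pvSymStepA room (pvSMap dB) n = pvSMap (pvSymStepB room dB n) ∧ pvInv (pvSymStepB room dB n) := by
  by_cases hc : dB.contains n = true
  · obtain ⟨v, hv⟩ : ∃ v, dB.get? n = some v := by
      rw [PySem.Dict.contains_eq_isSome_get?] at hc
      exact Option.isSome_iff_exists.mp hc
    have hvmem : (n, v) ∈ dB.items := PySem.Dict.mem_items_of_get?_eq_some dB hv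
    have hvnd : (v : List String).Nodup := h.2 _ hvmem
    have hmemA : (n, pvF v) ∈ (pvSMap dB).items := List.mem_map_of_mem (f := pvG) hvmem
    have hkeysA : (pvSMap dB).keys.Nodup := by rw [pvSMap_keys]; exact h.1
    have hgetA : (pvSMap dB).getD n [] = pvF v := PySem.Dict.getD_of_mem_items _ hmemA hkeysA []
    have hcA : (pvSMap dB).contains n = true := by rw [pvSMap_contains]; exact hc
    have hgetB : dB.getD n PySem.Set.empty = v := PySem.Dict.getD_of_mem_items _ hvmem h.1 _
    simp only [pvSymStepA, pvSymStepB, pv_setdefault_of_contains hcA, hgetA, hgetB]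
    by_cases hm : room ∈ (v : List String)
    · have hmF : room ∈ pvF v := ((pvF_perm v).mem_iff).mpr hm
      rw [if_pos hmF, PySem.Set.add_of_mem hm, pv_insert_self_value hv h.1]
      exact ⟨rfl, h⟩
    · have hmF : room ∉ pvF v := fun hh => hm (((pvF_perm v).mem_iff).mp hh)
      rw [if_neg hmF, PySem.Set.add_of_not_mem hm]
      have hnd2 : ((pvF v ++ [room]) : List String).Nodup := by
        simp [List.nodup_append, pvF_nodup hvnd]
        exact fun a ha har => hmF (har ▸ ha)
      have hndB : ((v ++ [room]) : List String).Nodup := by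
        simp [List.nodup_append, hvnd]
        exact fun a ha har => hm (har ▸ ha)
      refine ⟨?_, pvInv_insert h hndB n⟩
      rw [pvSMap_insert]
      congr 1
      rw [PySem.Set.ofList_eq_self_of_nodup _ hnd2]
      exact pvF_eq_of_perm (List.Perm.append_right [room] (pvF_perm v))
  · have hc' : dB.contains n = false := by simpa using hc
    have hcA' : (pvSMap dB).contains n = false := by rw [pvSMap_contains]; exact hc'
    simp only [pvSymStepA, pvSymStepB, pv_setdefault_of_not_contains hcA' [],
      PySem.Dict.getD_insert_self, PySem.Dict.getD_of_not_contains _ _ hc']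
    rw [if_neg (List.not_mem_nil), pv_insert_insert_same, pvSMap_insert]
    rw [show PySem.Set.add PySem.Set.empty room = [room] from
      PySem.Set.add_of_not_mem (List.not_mem_nil)]
    exact ⟨rfl, pvInv_insert h (List.nodup_singleton room) n⟩

-- the symmetrization inner loop (over one room's neighbours)
theorem pvSymFold_inner (room : String) (ns : List String) (dB : PySem.Dict String (PySem.Set String)) (h : pvInv dB) :
    ns.foldl (pvSymStepA room) (pvSMap dB) = pvSMap (ns.foldl (pvSymStepB room) dB)
    ∧ pvInv (ns.foldl (pvSymStepB room) dB) := by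
  induction ns generalizing dB with
  | nil => exact ⟨rfl, h⟩
  | cons n ns ih =>
    obtain ⟨h1, h2⟩ := pvSymStep_rel room n dB h
    simpa [h1] using ih _ h2

-- the symmetrization outer loop
theorem pvSymFold_outer (items2 : List (String × PySem.Set String)) (dB : PySem.Dict String (PySem.Set String)) (h : pvInv dB) :
    items2.foldl (fun d p => (pvF p.2).foldl (pvSymStepA p.1) d) (pvSMap dB)
      = pvSMap (items2.foldl (fun s p => (pvF p.2).foldl (pvSymStepB p.1) s) dB) := by
  induction items2 generalizing dB with
  | nil => rfl
  | cons p items2 ih =>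
    obtain ⟨h1, h2⟩ := pvSymFold_inner p.1 (pvF p.2) dB h
    simp only [List.foldl_cons, h1]
    exact ih _ h2

-- ===== the scatter fold characterized in closed (gather) form =====

-- rev over a prefix of base.items
def pvRevL (P : List (String × PySem.Set String)) (k : String) : List String :=
  P.filterMap (fun p => if k ∈ (p.2 : List String) then some p.1 else none)

-- extra over a prefix of base.items
def pvExtraL (base : PySem.Dict String (PySem.Set String)) (P : List (String × PySem.Set String)) : List String :=
  P.foldl (fun acc p => (pvF p.2).foldl (pvExtraStep base) acc) []

-- items of the scatter dict after processing prefix P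
def pvStateItems (base : PySem.Dict String (PySem.Set String)) (P : List (String × PySem.Set String)) : List (String × PySem.Set String) :=
  base.items.map (fun q => (q.1, PySem.Set.update q.2 (pvRevL P q.1)))
  ++ (pvExtraL base P).map (fun n => (n, PySem.Set.ofList (pvRevL P n)))

theorem pvRevL_append (P : List (String × PySem.Set String)) (p : String × PySem.Set String) (k : String) :
    pvRevL (P ++ [p]) k = pvRevL P k ++ (if k ∈ (p.2 : List String) then [p.1] else []) := by
  by_cases h : k ∈ (p.2 : List String) <;> simp [pvRevL, h]

theorem pvRevL_nil_of (P : List (String × PySem.Set String)) (k : String)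
    (h : ∀ p ∈ P, k ∉ (p.2 : List String)) : pvRevL P k = [] := by
  simp only [pvRevL, List.filterMap_eq_nil_iff]
  intro p hp
  simp [h p hp]

-- the extra scan over one room's (nodup) neighbour list appends exactly the new non-key names
theorem pvExtra_inner (base : PySem.Dict String (PySem.Set String)) (ms : List String)
    (hms : ms.Nodup) (acc : List String) :
    ms.foldl (pvExtraStep base) acc
      = acc ++ ms.filter (fun n => decide (¬(base.contains n = true ∨ n ∈ acc))) := by
  induction ms generalizing acc with
  | nil => simp
  | cons n ms ih =>
    have hnd := hms.of_cons
    have hn : n ∉ ms := (List.nodup_cons.mp hms).1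
    simp only [List.foldl_cons, pvExtraStep]
    by_cases h : base.contains n = true ∨ n ∈ acc
    · rw [if_pos h, ih hnd acc, List.filter_cons]
      simp [h]
    · rw [if_neg h, ih hnd (acc ++ [n]), List.filter_cons]
      have hfc : ms.filter (fun m => decide (¬(base.contains m = true ∨ m ∈ acc ++ [n])))
          = ms.filter (fun m => decide (¬(base.contains m = true ∨ m ∈ acc))) := by
        refine List.filter_congr (fun m hm => ?_)
        have hmn : m ≠ n := fun hh => hn (hh ▸ hm)
        simp [hmn]
      rw [hfc]
      simp [h]

-- membership in the extra scan (no nodup needed)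
theorem pvExtra_mem_inner (base : PySem.Dict String (PySem.Set String)) (ms : List String)
    (acc : List String) (x : String) :
    x ∈ ms.foldl (pvExtraStep base) acc
      ↔ x ∈ acc ∨ (base.contains x = false ∧ x ∈ ms) := by
  induction ms generalizing acc with
  | nil => simp
  | cons n ms ih =>
    simp only [List.foldl_cons, pvExtraStep]
    by_cases h : base.contains n = true ∨ n ∈ acc
    · rw [if_pos h, ih acc]
      constructor
      · rintro (hx | ⟨hcx, hxm⟩)
        · exact Or.inl hx
        · exact Or.inr ⟨hcx, List.mem_cons_of_mem _ hxm⟩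
      · rintro (hx | ⟨hcx, hxm⟩)
        · exact Or.inl hx
        · rcases List.mem_cons.mp hxm with rfl | hxm
          · rcases h with h | h
            · rw [hcx] at h; exact absurd h (by simp)
            · exact Or.inl h
          · exact Or.inr ⟨hcx, hxm⟩
    · rw [if_neg h, ih (acc ++ [n])]
      push_neg at h
      have hcn : base.contains n = false := by simpa using h.1
      constructor
      · rintro (hx | ⟨hcx, hxm⟩)
        · rcases List.mem_append.mp hx with hx | hx
          · exact Or.inl hx
          · rcases List.mem_singleton.mp hx with rfl
            exact Or.inr ⟨hcn, List.mem_cons_self ..⟩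
        · exact Or.inr ⟨hcx, List.mem_cons_of_mem _ hxm⟩
      · rintro (hx | ⟨hcx, hxm⟩)
        · exact Or.inl (List.mem_append.mpr (Or.inl hx))
        · rcases List.mem_cons.mp hxm with rfl | hxm
          · exact Or.inl (by simp)
          · exact Or.inr ⟨hcx, hxm⟩

theorem pvExtra_nodup_inner (base : PySem.Dict String (PySem.Set String)) (ms : List String)
    (acc : List String) (hacc : acc.Nodup) : (ms.foldl (pvExtraStep base) acc).Nodup := by
  induction ms generalizing acc with
  | nil => exact hacc
  | cons n ms ih =>
    simp only [List.foldl_cons, pvExtraStep]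
    by_cases h : base.contains n = true ∨ n ∈ acc
    · rw [if_pos h]; exact ih acc hacc
    · rw [if_neg h]
      push_neg at h
      refine ih _ ?_
      simp [List.nodup_append, hacc]
      exact fun a ha hh => h.2 (hh ▸ ha)

-- membership / nodup / freshness of extraL
theorem pvExtraL_mem (base : PySem.Dict String (PySem.Set String)) (P : List (String × PySem.Set String)) (x : String) :
    x ∈ pvExtraL base P ↔ base.contains x = false ∧ ∃ p ∈ P, x ∈ (p.2 : List String) := by
  suffices hgen : ∀ acc, x ∈ P.foldl (fun acc p => (pvF p.2).foldl (pvExtraStep base) acc) acc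
      ↔ x ∈ acc ∨ (base.contains x = false ∧ ∃ p ∈ P, x ∈ (p.2 : List String)) by
    have := hgen []
    simpa [pvExtraL] using this
  induction P with
  | nil => simp
  | cons p P ih =>
    intro acc
    simp only [List.foldl_cons, ih, pvExtra_mem_inner]
    rw [(pvF_perm (p.2 : List String)).mem_iff (a := x)]
    constructor
    · rintro ((hx | ⟨hc, hx⟩) | ⟨hc, q, hq, hx⟩)
      · exact Or.inl hx
      · exact Or.inr ⟨hc, p, List.mem_cons_self .., hx⟩
      · exact Or.inr ⟨hc, q, List.mem_cons_of_mem _ hq, hx⟩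
    · rintro (hx | ⟨hc, q, hq, hx⟩)
      · exact Or.inl (Or.inl hx)
      · rcases List.mem_cons.mp hq with rfl | hq
        · exact Or.inl (Or.inr ⟨hc, hx⟩)
        · exact Or.inr ⟨hc, q, hq, hx⟩

theorem pvExtraL_nodup (base : PySem.Dict String (PySem.Set String)) (P : List (String × PySem.Set String)) :
    (pvExtraL base P).Nodup := by
  suffices hgen : ∀ acc, acc.Nodup → (P.foldl (fun acc p => (pvF p.2).foldl (pvExtraStep base) acc) acc).Nodup from
    hgen [] List.nodup_nil
  induction P with
  | nil => exact fun acc h => h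
  | cons p P ih =>
    intro acc hacc
    exact ih _ (pvExtra_nodup_inner base _ acc hacc)

theorem pvExtraL_append (base : PySem.Dict String (PySem.Set String)) (P : List (String × PySem.Set String))
    (p : String × PySem.Set String) (hnd : (p.2 : List String).Nodup) :
    pvExtraL base (P ++ [p])
      = pvExtraL base P
        ++ (pvF p.2).filter (fun n => decide (¬(base.contains n = true ∨ n ∈ pvExtraL base P))) := by
  unfold pvExtraL
  rw [List.foldl_append]
  exact pvExtra_inner base (pvF p.2) (pvF_nodup hnd) _

-- keys of a dict whose items are pvStateItems
theorem pvStateItems_fst (base : PySem.Dict String (PySem.Set String)) (P : List (String × PySem.Set String)) :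
    (pvStateItems base P).map Prod.fst = base.keys ++ pvExtraL base P := by
  rw [pvStateItems, List.map_append, List.map_map, List.map_map]
  have h2 : (Prod.fst ∘ fun n => (n, PySem.Set.ofList (pvRevL P n))) = id := rfl
  rw [h2, List.map_id]
  rfl

-- the inner scatter fold over one room's (nodup) neighbour list, on a general dict
theorem pvSymInner (r : String) (ms : List String) (hms : ms.Nodup)
    (d : PySem.Dict String (PySem.Set String)) (hnd : d.keys.Nodup) :
    (ms.foldl (pvSymStepB r) d).items
      = d.items.map (fun q => if q.1 ∈ ms then (q.1, PySem.Set.add q.2 r) else q)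
        ++ (ms.filter (fun n => !(d.contains n))).map (fun n => (n, ([r] : PySem.Set String))) := by
  induction ms generalizing d with
  | nil => simp
  | cons n ms ih =>
    have hn : n ∉ ms := (List.nodup_cons.mp hms).1
    have hnd' := hms.of_cons
    simp only [List.foldl_cons]
    by_cases hc : d.contains n = true
    · -- value update in place
      obtain ⟨v, hv⟩ : ∃ v, d.get? n = some v := by
        rw [PySem.Dict.contains_eq_isSome_get?] at hc
        exact Option.isSome_iff_exists.mp hc
      have hgd : d.getD n PySem.Set.empty = v := by
        rw [PySem.Dict.getD_eq_get?_getD, hv]; rfl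
      have hitems : (pvSymStepB r d n).items
          = d.items.map (fun q => if q.1 = n then (q.1, PySem.Set.add q.2 r) else q) := by
        show (d.insert n (PySem.Set.add (d.getD n PySem.Set.empty) r)).items = _
        rw [PySem.Dict.items_insert_of_contains d _ hc]
        refine List.map_congr_left (fun q hq => ?_)
        by_cases hqn : q.1 = n
        · have hq' : (n, q.2) ∈ d.items := by
            have : q = (n, q.2) := by rw [← hqn]
            rw [← this]; exact hq
          have : d.get? n = some q.2 := PySem.Dict.get?_of_mem_items d hq' hnd
          have hv2 : q.2 = v := by rw [this] at hv; injection hv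
          have hgd' : d.getD n ([] : PySem.Set String) = v := hgd
          simp [hqn, hgd', hv2]
        · simp [hqn]
      have hkeys : (pvSymStepB r d n).keys = d.keys := by
        simp only [PySem.Dict.keys, hitems, List.map_map]
        refine List.map_congr_left (fun q _ => ?_)
        by_cases hqn : q.1 = n <;> simp [hqn, Function.comp]
      have hcont : ∀ m, (pvSymStepB r d n).contains m = d.contains m := by
        intro m
        rw [PySem.Dict.contains_eq_decide_mem_keys, PySem.Dict.contains_eq_decide_mem_keys, hkeys]
      rw [ih hnd' _ (hkeys ▸ hnd)]
      rw [hitems, List.map_map]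
      have hmap : d.items.map ((fun q => if q.1 ∈ ms then (q.1, PySem.Set.add q.2 r) else q)
            ∘ (fun q => if q.1 = n then (q.1, PySem.Set.add q.2 r) else q))
          = d.items.map (fun q => if q.1 ∈ n :: ms then (q.1, PySem.Set.add q.2 r) else q) := by
        refine List.map_congr_left (fun q _ => ?_)
        by_cases hqn : q.1 = n
        · simp [Function.comp, hqn, hn]
        · by_cases hqm : q.1 ∈ ms <;> simp [Function.comp, hqn, hqm]
      have hfilt : ms.filter (fun m => !((pvSymStepB r d n).contains m))
          = ms.filter (fun m => !(d.contains m)) := by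
        refine List.filter_congr (fun m _ => ?_)
        rw [hcont m]
      rw [hmap, hfilt, List.filter_cons]
      simp [hc]
    · -- fresh key appended
      have hc' : d.contains n = false := by simpa using hc
      have hval : PySem.Set.add (d.getD n PySem.Set.empty) r = ([r] : PySem.Set String) := by
        rw [PySem.Dict.getD_of_not_contains _ _ hc']
        exact PySem.Set.add_of_not_mem (List.not_mem_nil)
      have hitems : (pvSymStepB r d n).items = d.items ++ [(n, ([r] : PySem.Set String))] := by
        show (d.insert n (PySem.Set.add (d.getD n PySem.Set.empty) r)).items = _
        rw [PySem.Dict.items_insert_of_not_contains d _ hc', hval]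
      have hkeys : (pvSymStepB r d n).keys = d.keys ++ [n] := by
        simp [PySem.Dict.keys, hitems]
      have hnmem : n ∉ d.keys := by
        rw [PySem.Dict.contains_eq_decide_mem_keys] at hc'
        simpa using hc'
      have hnd2 : (pvSymStepB r d n).keys.Nodup := by
        rw [hkeys]
        simp [List.nodup_append, hnd]
        exact fun a ha hh => hnmem (hh ▸ ha)
      have hcont : ∀ m, (pvSymStepB r d n).contains m = (decide (m ∈ d.keys) || decide (m = n)) := by
        intro m
        rw [PySem.Dict.contains_eq_decide_mem_keys, hkeys]
        simp [List.mem_append]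
      rw [ih hnd' _ hnd2, hitems, List.map_append]
      have hmapd : d.items.map (fun q => if q.1 ∈ ms then (q.1, PySem.Set.add q.2 r) else q)
          = d.items.map (fun q => if q.1 ∈ n :: ms then (q.1, PySem.Set.add q.2 r) else q) := by
        refine List.map_congr_left (fun q hq => ?_)
        have hqn : q.1 ≠ n := by
          intro hh
          exact hnmem (hh ▸ (by simp only [PySem.Dict.keys]; exact List.mem_map_of_mem hq))
        by_cases hqm : q.1 ∈ ms <;> simp [hqn, hqm]
      have hsing : ([(n, ([r] : PySem.Set String))] : List (String × PySem.Set String)).map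
            (fun q => if q.1 ∈ ms then (q.1, PySem.Set.add q.2 r) else q)
          = [(n, ([r] : PySem.Set String))] := by
        simp [hn]
      have hfilt : ms.filter (fun m => !((pvSymStepB r d n).contains m))
          = ms.filter (fun m => !(d.contains m)) := by
        refine List.filter_congr (fun m hm => ?_)
        have hmn : m ≠ n := fun hh => hn (hh ▸ hm)
        rw [hcont m, PySem.Dict.contains_eq_decide_mem_keys]
        simp [hmn]
      rw [hmapd, hsing, hfilt, List.filter_cons]
      simp [PySem.Dict.contains_eq_decide_mem_keys, hnmem, List.append_assoc]

-- one outer scatter step advances the closed form by one room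
theorem pvSymOuterStep (base : PySem.Dict String (PySem.Set String)) (hbase : pvInv base)
    (P : List (String × PySem.Set String)) (p : String × PySem.Set String)
    (hnsd : (p.2 : List String).Nodup)
    (d : PySem.Dict String (PySem.Set String)) (hd : d.items = pvStateItems base P) :
    ((pvF p.2).foldl (pvSymStepB p.1) d).items = pvStateItems base (P ++ [p]) := by
  have hkeysd : d.keys = base.keys ++ pvExtraL base P := by
    simp only [PySem.Dict.keys, hd]; exact pvStateItems_fst base P
  have hndd : d.keys.Nodup := by
    rw [hkeysd]
    refine List.Nodup.append hbase.1 (pvExtraL_nodup base P) ?_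
    intro a ha hb
    have := ((pvExtraL_mem base P a).mp hb).1
    rw [PySem.Dict.contains_eq_decide_mem_keys] at this
    simp [ha] at this
  have hcontd : ∀ m, d.contains m = (base.contains m || decide (m ∈ pvExtraL base P)) := by
    intro m
    rw [PySem.Dict.contains_eq_decide_mem_keys, hkeysd,
        PySem.Dict.contains_eq_decide_mem_keys]
    simp [List.mem_append]
  rw [pvSymInner p.1 (pvF p.2) (pvF_nodup hnsd) d hndd, hd]
  -- membership in pvF p.2 is membership in p.2
  have hmemF : ∀ x, (x ∈ pvF (p.2 : List String)) ↔ x ∈ (p.2 : List String) :=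
    fun x => (pvF_perm (p.2 : List String)).mem_iff
  -- existing entries: update by the new rev suffix
  unfold pvStateItems
  rw [List.map_append, List.map_map, List.map_map]
  have hmap1 : base.items.map ((fun q => if q.1 ∈ pvF p.2 then (q.1, PySem.Set.add q.2 p.1) else q)
        ∘ (fun q => (q.1, PySem.Set.update q.2 (pvRevL P q.1))))
      = base.items.map (fun q => (q.1, PySem.Set.update q.2 (pvRevL (P ++ [p]) q.1))) := by
    refine List.map_congr_left (fun q _ => ?_)
    rw [Function.comp_apply, pvRevL_append, PySem.Set.update_append]
    by_cases hq : q.1 ∈ (p.2 : List String)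
    · simp [hmemF, hq, PySem.Set.update_cons]
    · simp [hmemF, hq]
  have hmap2 : (pvExtraL base P).map ((fun q => if q.1 ∈ pvF p.2 then (q.1, PySem.Set.add q.2 p.1) else q)
        ∘ (fun n => (n, PySem.Set.ofList (pvRevL P n))))
      = (pvExtraL base P).map (fun n => (n, PySem.Set.ofList (pvRevL (P ++ [p]) n))) := by
    refine List.map_congr_left (fun n _ => ?_)
    rw [Function.comp_apply, pvRevL_append, PySem.Set.ofList_append]
    by_cases hq : n ∈ (p.2 : List String)
    · simp [hmemF, hq, PySem.Set.update_cons]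
    · simp [hmemF, hq]
  rw [hmap1, hmap2]
  -- new keys: exactly the appended tail of extraL, with value [p.1]
  rw [pvExtraL_append base P p hnsd, List.map_append, List.append_assoc]
  congr 1
  congr 1
  have hfilt : (pvF p.2).filter (fun n => !(d.contains n))
      = (pvF p.2).filter (fun n => decide (¬(base.contains n = true ∨ n ∈ pvExtraL base P))) := by
    refine List.filter_congr (fun n _ => ?_)
    rw [hcontd n]
    by_cases h1 : base.contains n = true <;> by_cases h2 : n ∈ pvExtraL base P <;> simp [h1, h2]
  rw [hfilt]
  refine List.map_congr_left (fun n hn => ?_)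
  have hn' := List.of_mem_filter hn
  have hnm := List.mem_of_mem_filter hn
  have hc : base.contains n = false ∧ n ∉ pvExtraL base P := by
    constructor
    · by_cases h : base.contains n = true
      · exfalso; revert hn'; simp [h]
      · simpa using h
    · intro h; revert hn'; simp [h]
  have hrev : pvRevL P n = [] := by
    refine pvRevL_nil_of P n (fun q hq hmem => ?_)
    exact hc.2 ((pvExtraL_mem base P n).mpr ⟨hc.1, q, hq, hmem⟩)
  have hrev' : pvRevL (P ++ [p]) n = [p.1] := by
    rw [pvRevL_append, hrev]
    simp [(hmemF n).mp hnm]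
  rw [hrev']
  rfl

-- the whole scatter fold in closed form
theorem pvSymClosed (base : PySem.Dict String (PySem.Set String)) (hbase : pvInv base) :
    (base.items.foldl (fun s p => (pvF p.2).foldl (pvSymStepB p.1) s) base).items
      = pvStateItems base base.items := by
  suffices hgen : ∀ Q P d, base.items = P ++ Q → (∀ q ∈ Q, (q.2 : List String).Nodup) →
      d.items = pvStateItems base P →
      (Q.foldl (fun s p => (pvF p.2).foldl (pvSymStepB p.1) s) d).items = pvStateItems base (P ++ Q) by
    have hinit : base.items = pvStateItems base [] := by
      unfold pvStateItems pvExtraL pvRevL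
      simp
    have := hgen base.items [] base (by simp) (fun q hq => hbase.2 q hq) hinit
    simpa using this
  intro Q
  induction Q with
  | nil => intro P d _ _ hd; simpa using hd
  | cons p Q ih =>
    intro P d hsplit hQnd hd
    simp only [List.foldl_cons]
    have hstep := pvSymOuterStep base hbase P p (hQnd p (List.mem_cons_self ..)) d hd
    have := ih (P ++ [p]) _ (by simpa using hsplit) (fun q hq => hQnd q (List.mem_cons_of_mem _ hq)) hstep
    simpa using this

-- two nodup sets with the same members sort to the same list
theorem pvF_eq_of_mem {u v : List String} (hu : u.Nodup) (hv : v.Nodup)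
    (h : ∀ x, x ∈ u ↔ x ∈ v) : pvF u = pvF v :=
  pvF_eq_of_perm ((List.perm_ext_iff_of_nodup hu hv).mpr h)

-- ===== VERDICT (by name: the statement is the Claim_ definition above) =====
theorem normalize_layout_adjacency_py_spec : Claim_equal_normalize_layout_adjacency_py := by
  intro raw _
  show normalize_layout_adjacency_py raw = normalize_layout_adjacency_py_alt raw
  obtain ⟨hrel, hinv⟩ := pvPhase1_rel raw
  set base := pvPhase1B raw with hbase
  -- A's symmetrization is the scatter fold through the value map
  unfold normalize_layout_adjacency_py
  rw [hrel]
  have hAfold : ((pvSMap base).items.foldl (fun d p => p.2.foldl (pvSymStepA p.1) d) (pvSMap base))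
      = (base.items.foldl (fun d p => (pvF p.2).foldl (pvSymStepA p.1) d) (pvSMap base)) := by
    show (((base.items.map pvG)).foldl (fun d p => p.2.foldl (pvSymStepA p.1) d) (pvSMap base)) = _
    rw [List.foldl_map]
    simp only [pvG]
  rw [hAfold, pvSymFold_outer base.items base hinv]
  -- hence A's items are the gather closed form, mapped through pvG
  show ((base.items.foldl (fun s p => (pvF p.2).foldl (pvSymStepB p.1) s) base).items.map pvG)
      = normalize_layout_adjacency_py_alt raw
  rw [pvSymClosed base hinv]
  unfold normalize_layout_adjacency_py_alt pvStateItems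
  rw [← hbase, List.map_append, List.map_map, List.map_map, List.map_append]
  congr 1
  · -- base keys: row k = sorted neighbours ∪ reverse edges
    have hkeys : base.keys.map (fun k => (k, pvRow base k))
        = base.items.map (fun q => (q.1, pvRow base q.1)) := by
      simp only [PySem.Dict.keys, List.map_map]; rfl
    rw [hkeys]
    refine List.map_congr_left (fun q hq => ?_)
    have hqnd : (q.2 : List String).Nodup := hinv.2 q hq
    have hget : base.getD q.1 PySem.Set.empty = q.2 :=
      PySem.Dict.getD_of_mem_items base (by exact hq) hinv.1 _
    show (q.1, pvF (PySem.Set.update q.2 (pvRevL base.items q.1))) = (q.1, pvRow base q.1)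
    unfold pvRow
    rw [hget]
    refine congrArg _ ?_
    refine pvF_eq_of_mem (PySem.Set.nodup_update q.2 _ hqnd) (PySem.Set.nodup_union q.2 _ hqnd) ?_
    intro x
    rw [PySem.Set.mem_update, PySem.Set.mem_union, PySem.Set.mem_ofList]
    exact Iff.rfl
  · -- extra keys: row n = sorted reverse edges
    refine List.map_congr_left (fun n hn => ?_)
    have hc : base.contains n = false := ((pvExtraL_mem base base.items n).mp hn).1
    show (n, pvF (PySem.Set.ofList (pvRevL base.items n))) = (n, pvRow base n)
    unfold pvRow
    rw [PySem.Dict.getD_of_not_contains _ _ hc]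
    refine congrArg _ ?_
    refine pvF_eq_of_mem (PySem.Set.nodup_ofList _) (PySem.Set.nodup_union PySem.Set.empty _ List.nodup_nil) ?_
    intro x
    rw [PySem.Set.mem_ofList, PySem.Set.mem_union, PySem.Set.mem_ofList]
    simp [PySem.Set.empty, pvRev, pvRevL]
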